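-- pv_equiv track=rewrite | github.com/yujingcheong/ir | main (2).py | get_game_type
-- ===== SOURCE A (Python) =====
-- def get_game_type(title):
--     title = title.lower()
--     if any(w in title for w in ["soccer", "football", "fifa", "nba", "golf", "baseball"]):
--         return 0  # sports
--     elif any(w in title for w in ["race", "racing", "speed", "kart", "drive", "car"]):
--         return 1  # racing
--     elif any(w in title for w in ["shoot", "battle", "war", "sniper", "duty", "combat"]):
--         return 2  # shooter
--     elif any(w in title for w in ["puzzle", "logic", "brain"]):
--         return 3  # puzzle
--     elif any(w in title for w in ["adventure", "quest", "hero", "fantasy"]):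
--         return 4  # adventure
--     elif any(w in title for w in ["kids", "learning", "educational", "fisher", "price"]):
--         return 5  # kids
--     else:
--         return 6  # other
-- ===== SOURCE B (Python) =====
-- _KEYWORD_CATEGORY = {
--     "soccer": 0, "football": 0, "fifa": 0, "nba": 0, "golf": 0, "baseball": 0,
--     "race": 1, "racing": 1, "speed": 1, "kart": 1, "drive": 1, "car": 1,
--     "shoot": 2, "battle": 2, "war": 2, "sniper": 2, "duty": 2, "combat": 2,
--     "puzzle": 3, "logic": 3, "brain": 3,
--     "adventure": 4, "quest": 4, "hero": 4, "fantasy": 4,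
--     "kids": 5, "learning": 5, "educational": 5, "fisher": 5, "price": 5,
-- }
--
-- def get_game_type(title):
--     t = title.lower()
--     best = 6  # other
--     for w, c in _KEYWORD_CATEGORY.items():
--         if w in t and c < best:
--             best = c
--     return best
-- ===== Notes on version B (the rewrite author's own statement) =====
-- stated objective: alternative
-- what changed: Replaced the ordered first-match if/elif group chain by a flat keyword-to-category map scanned once while tracking the minimum matched category (default 6); correct because A returns the smallest matching group index.
import Mathlib
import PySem

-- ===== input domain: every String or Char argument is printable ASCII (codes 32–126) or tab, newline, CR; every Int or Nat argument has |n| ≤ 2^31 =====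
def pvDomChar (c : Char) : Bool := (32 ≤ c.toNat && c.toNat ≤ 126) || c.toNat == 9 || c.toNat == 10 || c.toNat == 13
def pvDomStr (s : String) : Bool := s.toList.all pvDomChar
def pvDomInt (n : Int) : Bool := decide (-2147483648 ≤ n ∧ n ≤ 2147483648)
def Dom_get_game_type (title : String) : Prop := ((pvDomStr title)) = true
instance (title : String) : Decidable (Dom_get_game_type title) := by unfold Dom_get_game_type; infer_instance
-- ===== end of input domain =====

-- B replaces A's ordered first-match if/elif group chain by a flat keyword→category map
-- scanned once while tracking the minimum matched category (alternative; same cost).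

-- ===== PORT A =====
def get_game_type (title : String) : Int :=
  let title := PySem.Str.lower title
  if (["soccer", "football", "fifa", "nba", "golf", "baseball"]).any (fun w => PySem.Str.isIn w title) then 0
  else if (["race", "racing", "speed", "kart", "drive", "car"]).any (fun w => PySem.Str.isIn w title) then 1
  else if (["shoot", "battle", "war", "sniper", "duty", "combat"]).any (fun w => PySem.Str.isIn w title) then 2
  else if (["puzzle", "logic", "brain"]).any (fun w => PySem.Str.isIn w title) then 3
  else if (["adventure", "quest", "hero", "fantasy"]).any (fun w => PySem.Str.isIn w title) then 4
  else if (["kids", "learning", "educational", "fisher", "price"]).any (fun w => PySem.Str.isIn w title) then 5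
  else 6

-- ===== PORT B =====
-- the _KEYWORD_CATEGORY dict of Source B, in insertion order (association list)
def keywordCategory : List (String × Int) :=
  [ ("soccer", 0), ("football", 0), ("fifa", 0), ("nba", 0), ("golf", 0), ("baseball", 0),
    ("race", 1), ("racing", 1), ("speed", 1), ("kart", 1), ("drive", 1), ("car", 1),
    ("shoot", 2), ("battle", 2), ("war", 2), ("sniper", 2), ("duty", 2), ("combat", 2),
    ("puzzle", 3), ("logic", 3), ("brain", 3),
    ("adventure", 4), ("quest", 4), ("hero", 4), ("fantasy", 4),
    ("kids", 5), ("learning", 5), ("educational", 5), ("fisher", 5), ("price", 5) ]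

-- Source B's loop: 'best = 6; for w, c in _KEYWORD_CATEGORY.items(): if w in t and c < best: best = c'
def get_game_type_alt (title : String) : Int :=
  let t := PySem.Str.lower title
  keywordCategory.foldl
    (fun best p => if PySem.Str.isIn p.1 t && decide (p.2 < best) then p.2 else best) 6

-- ===== PRECONDITION & SPEC =====
def Spec_get_game_type (title : String) (out : Int) : Prop := out = get_game_type_alt title
instance (title : String) (out : Int) : Decidable (Spec_get_game_type title out) := by unfold Spec_get_game_type; infer_instance

-- ===== CLAIM (what is proved, stated in full; the proofs are below) =====
def Claim_equal_get_game_type : Prop := ∀ (title : String), Dom_get_game_type title → Spec_get_game_type title (get_game_type title)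

-- ===== LEMMAS AND PROOFS =====

-- Folding B's min-tracking step over a group of keywords that all carry the same
-- category c lowers the accumulator to min acc c exactly when some keyword matches.
theorem foldl_min_group (m : String → Bool) (ws : List String) (c : Int) (acc : Int) :
    List.foldl (fun best p => if m p.1 && decide (p.2 < best) then p.2 else best) acc
      (ws.map (fun w => (w, c)))
    = if ws.any m then min acc c else acc := by
  induction ws generalizing acc with
  | nil => simp
  | cons w rest ih =>
    simp only [List.map_cons, List.foldl_cons, List.any_cons]
    by_cases hm : m w = true
    · have hstep : (if m w && decide (c < acc) then c else acc) = min acc c := by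
        rcases lt_or_ge c acc with h | h
        · rw [hm]; simp [h, min_eq_right h.le]
        · rw [hm]; simp [not_lt.mpr h, min_eq_left h]
      rw [hstep, ih]
      simp only [hm, Bool.true_or, if_true]
      by_cases h : rest.any m = true
      · simp [h]
      · rw [Bool.not_eq_true] at h
        simp [h]
    · rw [Bool.not_eq_true] at hm
      simp only [hm, Bool.false_and, Bool.false_or, Bool.false_eq_true, if_false]
      exact ih acc

-- the same fact with the membership test spelled out, so that rw matches the goal
theorem foldl_min_group' (t : String) (ws : List String) (c : Int) (acc : Int) :
    List.foldl (fun best p => if PySem.Str.isIn p.1 t && decide (p.2 < best) then p.2 else best) acc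
      (ws.map (fun w => (w, c)))
    = if ws.any (fun w => PySem.Str.isIn w t) then min acc c else acc :=
  foldl_min_group (fun w => PySem.Str.isIn w t) ws c acc

-- ===== VERDICT (by name: the statement is the Claim_ definition above) =====
theorem get_game_type_spec : Claim_equal_get_game_type := by
  intro title _
  unfold Spec_get_game_type get_game_type get_game_type_alt
  have htab : keywordCategory =
      ((["soccer", "football", "fifa", "nba", "golf", "baseball"]).map (fun w => (w, (0:Int))))
      ++ ((["race", "racing", "speed", "kart", "drive", "car"]).map (fun w => (w, (1:Int))))
      ++ ((["shoot", "battle", "war", "sniper", "duty", "combat"]).map (fun w => (w, (2:Int))))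
      ++ ((["puzzle", "logic", "brain"]).map (fun w => (w, (3:Int))))
      ++ ((["adventure", "quest", "hero", "fantasy"]).map (fun w => (w, (4:Int))))
      ++ ((["kids", "learning", "educational", "fisher", "price"]).map (fun w => (w, (5:Int)))) := by
    rfl
  rw [htab]
  rw [List.foldl_append, List.foldl_append, List.foldl_append, List.foldl_append, List.foldl_append]
  rw [foldl_min_group' (PySem.Str.lower title), foldl_min_group' (PySem.Str.lower title),
      foldl_min_group' (PySem.Str.lower title), foldl_min_group' (PySem.Str.lower title),
      foldl_min_group' (PySem.Str.lower title), foldl_min_group' (PySem.Str.lower title)]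
  rcases Bool.eq_false_or_eq_true ((["soccer", "football", "fifa", "nba", "golf", "baseball"] : List String).any (fun w => PySem.Str.isIn w (PySem.Str.lower title))) with h0 | h0 <;>
  rcases Bool.eq_false_or_eq_true ((["race", "racing", "speed", "kart", "drive", "car"] : List String).any (fun w => PySem.Str.isIn w (PySem.Str.lower title))) with h1 | h1 <;>
  rcases Bool.eq_false_or_eq_true ((["shoot", "battle", "war", "sniper", "duty", "combat"] : List String).any (fun w => PySem.Str.isIn w (PySem.Str.lower title))) with h2 | h2 <;>
  rcases Bool.eq_false_or_eq_true ((["puzzle", "logic", "brain"] : List String).any (fun w => PySem.Str.isIn w (PySem.Str.lower title))) with h3 | h3 <;>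
  rcases Bool.eq_false_or_eq_true ((["adventure", "quest", "hero", "fantasy"] : List String).any (fun w => PySem.Str.isIn w (PySem.Str.lower title))) with h4 | h4 <;>
  rcases Bool.eq_false_or_eq_true ((["kids", "learning", "educational", "fisher", "price"] : List String).any (fun w => PySem.Str.isIn w (PySem.Str.lower title))) with h5 | h5 <;>
  simp only [h0, h1, h2, h3, h4, h5] <;> norm_num
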